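-- pv_equiv track=rewrite | github.com/ojhermann-ucd/comp47600 | 16203034_hermanOtto_practical5/q3/q3.py | spam_index
-- ===== SOURCE A (Python) =====
-- def spam_index(integer):
-- 	length = len(list("{0:b}".format(integer - 1))) # size of containters
-- 	spam_indices = list()
-- 	for k in range(integer):
-- 		binary_elements = list("{0:b}".format(k))
-- 		temp_list = [0 for k in range(length - len(binary_elements))]
-- 		for b in binary_elements:
-- 			temp_list.append(int(b))
-- 		spam_indices.append(temp_list)
-- 	return spam_indices
-- ===== SOURCE B (Python) =====
-- def spam_index(integer):
--     if integer <= 0: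
--         return []
--     length = max(1, (integer - 1).bit_length())
--     return [[(k >> (length - 1 - i)) & 1 for i in range(length)]
--             for k in range(integer)]
-- ===== Notes on version B (the rewrite author's own statement) =====
-- stated objective: idiomatic
-- what changed: Each row is produced by positional bit extraction ((k >> (length-1-i)) & 1) over a width computed with int.bit_length, instead of binary string formatting plus a manual zero-padding loop and per-character int() conversion.
import Mathlib
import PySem

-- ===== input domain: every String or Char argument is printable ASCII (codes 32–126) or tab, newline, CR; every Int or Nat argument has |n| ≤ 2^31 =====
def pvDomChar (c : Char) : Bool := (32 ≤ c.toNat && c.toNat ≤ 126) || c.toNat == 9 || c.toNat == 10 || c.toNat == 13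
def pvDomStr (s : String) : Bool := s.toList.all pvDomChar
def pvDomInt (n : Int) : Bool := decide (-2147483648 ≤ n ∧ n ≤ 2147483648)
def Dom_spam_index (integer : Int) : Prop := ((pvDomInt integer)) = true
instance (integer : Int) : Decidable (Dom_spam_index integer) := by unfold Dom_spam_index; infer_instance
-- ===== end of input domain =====

-- B produces each row by positional bit extraction over a bit_length-derived width,
-- replacing A's binary string formatting + manual zero padding + per-char int(); same values.

-- ===== PORT A =====
-- hand port of "{0:b}".format(n) for n ≥ 1: digits most-significant first (exact on Nat ≥ 1)
def binChars (n : Nat) : List Char :=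
  if n = 0 then []
  else binChars (n / 2) ++ [if n % 2 = 1 then '1' else '0']
decreasing_by exact Nat.div_lt_self (Nat.pos_of_ne_zero (by assumption)) (by norm_num)

-- hand port of list("{0:b}".format(n)) for any int n (exact: '0' for zero, '-' sign for negatives)
def pyBinStr (n : Int) : List Char :=
  if n < 0 then '-' :: binChars (-n).toNat
  else if n = 0 then ['0'] else binChars n.toNat

-- int(b) where b is a one-char binary digit string (exact on the '0'/'1' chars A feeds it)
def chDigit (c : Char) : Int := if c = '1' then 1 else 0

def spam_index (integer : Int) : List (List Int) :=
  let length : Int := (pyBinStr (integer - 1)).length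
  (PySem.List.pyRange 0 integer 1).foldl
    (fun acc k =>
      let binary_elements := pyBinStr k
      let temp_list : List Int :=
        (PySem.List.pyRange 0 (length - (binary_elements.length : Int)) 1).map (fun _ => (0 : Int))
      let temp_list := binary_elements.foldl (fun t b => t ++ [chDigit b]) temp_list
      acc ++ [temp_list]) []

-- ===== PORT B =====
-- port of int.bit_length for n ≥ 0
def bitLen (n : Nat) : Nat :=
  if n = 0 then 0 else bitLen (n / 2) + 1
decreasing_by exact Nat.div_lt_self (Nat.pos_of_ne_zero (by assumption)) (by norm_num)

-- the inner comprehension: [(k >> (length-1-i)) & 1 for i in range(length)]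
def bbits (L k : Nat) : List Int :=
  (List.range L).map (fun i => (((k >>> (L - 1 - i)) &&& 1 : Nat) : Int))

def spam_index_alt (integer : Int) : List (List Int) :=
  if integer ≤ 0 then []
  else
    let length := max 1 (bitLen (integer - 1).toNat)
    (PySem.List.pyRange 0 integer 1).map (fun k => bbits length k.toNat)

-- ===== PRECONDITION & SPEC =====
def Spec_spam_index (integer : Int) (out : List (List Int)) : Prop := out = spam_index_alt integer
instance (integer : Int) (out : List (List Int)) : Decidable (Spec_spam_index integer out) := by unfold Spec_spam_index; infer_instance

-- ===== CLAIM (what is proved, stated in full; the proofs are below) =====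
def Claim_equal_spam_index : Prop := ∀ (integer : Int), Dom_spam_index integer → Spec_spam_index integer (spam_index integer)

-- ===== LEMMAS AND PROOFS =====

theorem binChars_len (n : Nat) : (binChars n).length = bitLen n := by
  induction n using Nat.strong_induction_on with
  | _ n ih =>
    rw [binChars, bitLen]
    by_cases h : n = 0
    · simp [h]
    · simp only [if_neg h, List.length_append, List.length_singleton]
      rw [ih (n / 2) (Nat.div_lt_self (Nat.pos_of_ne_zero h) (by norm_num))]

theorem lt_two_pow_bitLen (n : Nat) : n < 2 ^ bitLen n := by
  induction n using Nat.strong_induction_on with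
  | _ n ih =>
    rw [bitLen]
    by_cases h : n = 0
    · simp [h]
    · rw [if_neg h]
      have h2 := ih (n / 2) (Nat.div_lt_self (Nat.pos_of_ne_zero h) (by norm_num))
      rw [pow_succ]
      omega

theorem bbits_succ (L k : Nat) :
    bbits (L + 1) k = bbits L (k / 2) ++ [((k % 2 : Nat) : Int)] := by
  unfold bbits
  rw [List.range_succ, List.map_append]
  congr 1
  · apply List.map_congr_left
    intro i hi
    have hiL : i < L := List.mem_range.mp hi
    have he : L + 1 - 1 - i = (L - 1 - i) + 1 := by omega
    rw [he, Nat.shiftRight_eq_div_pow, Nat.shiftRight_eq_div_pow, pow_succ',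
      ← Nat.div_div_eq_div_mul]
  · simp [Nat.and_one_is_mod]

theorem binChars_zero : binChars 0 = [] := by rw [binChars]; simp

theorem pyBinStr_zero : pyBinStr (0 : Int) = ['0'] := by
  rw [pyBinStr]; norm_num

theorem pyBinStr_one : pyBinStr (1 : Int) = ['1'] := by
  rw [pyBinStr]
  norm_num
  rw [binChars]
  norm_num [binChars_zero]

-- A's padded digit row equals B's bit-extraction row, for any width covering k.
theorem padBits (L k : Nat) (hL : 1 ≤ L) (hk : k < 2 ^ L) :
    List.replicate (L - (pyBinStr (k : Int)).length) (0 : Int)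
      ++ (pyBinStr (k : Int)).map chDigit = bbits L k := by
  induction L generalizing k with
  | zero => omega
  | succ L ih =>
    by_cases hL0 : L = 0
    · subst hL0
      interval_cases k <;>
        · simp only [Nat.cast_zero, Nat.cast_one, pyBinStr_zero, pyBinStr_one]
          simp [bbits, chDigit, List.range_succ]
    · have hL1 : 1 ≤ L := Nat.pos_of_ne_zero hL0
      have hk2 : k / 2 < 2 ^ L := by
        have : 2 ^ (L + 1) = 2 ^ L * 2 := pow_succ 2 L
        omega
      rw [bbits_succ, ← ih (k / 2) hL1 hk2]
      by_cases hk1 : k ≤ 1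
      · have hrep : List.replicate (L + 1 - 1) (0 : Int)
            = List.replicate (L - 1) 0 ++ List.replicate 1 0 := by
          rw [← List.replicate_add]; congr 1; omega
        interval_cases k
        · rw [(by norm_num : (0 : Nat) / 2 = 0)]
          simp only [Nat.cast_zero, pyBinStr_zero]
          simp only [List.length_cons, List.length_nil, hrep, List.map_cons, List.map_nil]
          simp [chDigit]
        · rw [(by norm_num : (1 : Nat) / 2 = 0)]
          simp only [Nat.cast_zero, Nat.cast_one, pyBinStr_one, pyBinStr_zero]
          simp only [List.length_cons, List.length_nil, hrep, List.map_cons, List.map_nil]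
          simp [chDigit]
      · -- k ≥ 2
        have hk2' : 2 ≤ k := by omega
        have hpy : pyBinStr (k : Int) = binChars (k / 2) ++ [if k % 2 = 1 then '1' else '0'] := by
          rw [pyBinStr, if_neg (by omega : ¬ ((k : Int) < 0)), if_neg (by omega : ¬ ((k : Int) = 0)),
            Int.toNat_natCast, binChars, if_neg (by omega : ¬ (k = 0))]
        have hpy2 : pyBinStr ((k / 2 : Nat) : Int) = binChars (k / 2) := by
          rw [pyBinStr, if_neg (by omega : ¬ (((k / 2 : Nat) : Int) < 0)),
            if_neg (by omega : ¬ (((k / 2 : Nat) : Int) = 0)), Int.toNat_natCast]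
        rw [hpy, hpy2]
        have hlen : (binChars (k / 2) ++ [if k % 2 = 1 then '1' else '0']).length
            = (binChars (k / 2)).length + 1 := by simp
        rw [hlen, List.map_append]
        have hsub : L + 1 - ((binChars (k / 2)).length + 1) = L - (binChars (k / 2)).length := by omega
        rw [hsub, ← List.append_assoc]
        congr 1
        show [chDigit (if k % 2 = 1 then '1' else '0')] = [((k % 2 : Nat) : Int)]
        rcases Nat.mod_two_eq_zero_or_one k with h | h <;> simp [h, chDigit]

-- ===== VERDICT (by name: the statement is the Claim_ definition above) =====
theorem map_zeros (l : List Int) :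
    l.map (fun _ => (0 : Int)) = List.replicate l.length 0 := by
  induction l with
  | nil => rfl
  | cons x xs ih => simp [ih, List.replicate_succ]

theorem zerosMap (m : Int) :
    (PySem.List.pyRange 0 m 1).map (fun _ => (0 : Int)) = List.replicate m.toNat 0 := by
  rw [map_zeros, PySem.List.length_pyRange_one]
  norm_num

theorem lenPy (integer : Int) (h : 0 < integer) :
    (pyBinStr (integer - 1)).length = max 1 (bitLen (integer - 1).toNat) := by
  by_cases h1 : integer = 1
  · subst h1
    norm_num [pyBinStr]
    rw [bitLen]
    norm_num
  · have h2 : (1 : Int) ≤ integer - 1 := by omega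
    rw [pyBinStr, if_neg (by omega), if_neg (by omega), binChars_len]
    have : 1 ≤ bitLen (integer - 1).toNat := by
      rw [bitLen]
      split
      · omega
      · omega
    omega

theorem spam_index_spec : Claim_equal_spam_index := by
  intro integer _
  show spam_index integer = spam_index_alt integer
  rw [spam_index, spam_index_alt]
  by_cases h : integer ≤ 0
  · rw [if_pos h, PySem.List.pyRange_one_eq_nil h]
    rfl
  · rw [if_neg h]
    have hpos : 0 < integer := by omega
    rw [PySem.List.foldl_append_singleton_eq_map, List.nil_append]
    apply List.map_congr_left
    intro k hk
    obtain ⟨hk0, hk1⟩ := (PySem.List.mem_pyRange_one).mp hk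
    rw [PySem.List.foldl_append_singleton_eq_map, zerosMap]
    have hL : (pyBinStr (integer - 1)).length = max 1 (bitLen (integer - 1).toNat) :=
      lenPy integer hpos
    set L := max 1 (bitLen (integer - 1).toNat) with hLdef
    have hcast : (k : Int) = ((k.toNat : Nat) : Int) := by omega
    have htn : ((L : Int) - ((pyBinStr k).length : Int)).toNat
        = L - (pyBinStr k).length := by omega
    have hkL : k.toNat < 2 ^ L := by
      have h1 : k.toNat ≤ (integer - 1).toNat := by omega
      have h2 : (integer - 1).toNat < 2 ^ bitLen (integer - 1).toNat :=
        lt_two_pow_bitLen _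
      have h3 : (2 : Nat) ^ bitLen (integer - 1).toNat ≤ 2 ^ L :=
        Nat.pow_le_pow_right (by norm_num) (le_max_right _ _)
      omega
    rw [hL, htn, hcast, padBits L k.toNat (le_max_left _ _) hkL, Int.toNat_natCast]
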